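-- pv_equiv track=rewrite | github.com/mazharvai007/introduction-of-python | Module-and-Packages/rating.py | analysis_ratings
-- ===== SOURCE A (Python) =====
-- def analysis_ratings(ratings):
--     if not ratings:
--         return None
--
--     for i in ratings:
--         if not isinstance(i, int):
--             return
--
--         if i not in [1, 2, 3, 4, 5]:
--             return
--
--     max_rating = max(ratings)
--     min_rating = min(ratings)
--
--     return [max_rating, min_rating]
-- ===== SOURCE B (Python) =====
-- def analysis_ratings(ratings):
--     if not ratings:
--         return None
--     hi = lo = ratings[0]
--     for i in ratings:
--         if not isinstance(i, int):
--             return None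
--         if not (1 <= i <= 5):
--             return None
--         if i > hi:
--             hi = i
--         if i < lo:
--             lo = i
--     return [hi, lo]
-- ===== Notes on version B (the rewrite author's own statement) =====
-- stated objective: alternative
-- what changed: Replaced A's validation pass plus two separate max() and min() scans with a single loop that validates each element and maintains running hi/lo accumulators.
import Mathlib
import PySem

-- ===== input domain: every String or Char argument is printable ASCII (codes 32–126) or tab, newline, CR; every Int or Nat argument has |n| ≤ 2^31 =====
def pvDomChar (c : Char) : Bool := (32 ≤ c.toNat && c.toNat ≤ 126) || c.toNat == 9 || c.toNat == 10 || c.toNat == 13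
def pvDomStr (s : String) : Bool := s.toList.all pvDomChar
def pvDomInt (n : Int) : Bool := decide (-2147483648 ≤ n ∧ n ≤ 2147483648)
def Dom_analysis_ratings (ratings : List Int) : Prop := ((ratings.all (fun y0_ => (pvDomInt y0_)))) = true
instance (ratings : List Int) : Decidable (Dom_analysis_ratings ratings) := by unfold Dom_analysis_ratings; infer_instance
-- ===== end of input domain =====

-- B: one pass maintaining running hi/lo with inline validation, instead of A's validation loop plus separate max() and min() scans.


-- ===== PORT A =====
-- the for-loop of A: early-return none on the first element not in [1,2,3,4,5]
-- (isinstance(i, int) is always true on List Int)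
def arCheck (l : List Int) : Bool :=
  match l with
  | [] => true
  | i :: rest =>
    if !(decide (i ∈ ([1, 2, 3, 4, 5] : List Int))) then false
    else arCheck rest

def analysis_ratings (ratings : List Int) : Option (List Int) :=
  if ratings = [] then none
  else if arCheck ratings then
    match PySem.List.max? ratings (fun x => x), PySem.List.min? ratings (fun x => x) with
    | some mx, some mn => some [mx, mn]
    | _, _ => none
  else none

-- ===== PORT B =====
-- the single loop of B: validate each element, keep running hi/lo
def altLoop (hi lo : Int) (l : List Int) : Option (List Int) :=
  match l with
  | [] => some [hi, lo]
  | i :: rest =>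
    if !(decide (1 ≤ i ∧ i ≤ 5)) then none
    else altLoop (if i > hi then i else hi) (if i < lo then i else lo) rest

def analysis_ratings_alt (ratings : List Int) : Option (List Int) :=
  match ratings with
  | [] => none
  | r0 :: _ => altLoop r0 r0 ratings

-- ===== PRECONDITION & SPEC =====
def Spec_analysis_ratings (ratings : List Int) (out : Option (List Int)) : Prop := out = analysis_ratings_alt ratings
instance (ratings : List Int) (out : Option (List Int)) : Decidable (Spec_analysis_ratings ratings out) := by unfold Spec_analysis_ratings; infer_instance

-- ===== CLAIM (what is proved, stated in full; the proofs are below) =====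
def Claim_equal_analysis_ratings : Prop := ∀ (ratings : List Int), Dom_analysis_ratings ratings → Spec_analysis_ratings ratings (analysis_ratings ratings)

-- ===== LEMMAS AND PROOFS =====

theorem arCheck_true_iff (l : List Int) : arCheck l = true ↔ ∀ i ∈ l, 1 ≤ i ∧ i ≤ 5 := by
  induction l with
  | nil => simp [arCheck]
  | cons x t ih =>
    simp [arCheck, ih]
    intro _
    omega

theorem altLoop_valid (l : List Int) (hi lo : Int)
    (h : ∀ i ∈ l, 1 ≤ i ∧ i ≤ 5) :
    altLoop hi lo l = some [l.foldl max hi, l.foldl min lo] := by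
  induction l generalizing hi lo with
  | nil => simp [altLoop]
  | cons x t ih =>
    have hx := h x (List.mem_cons_self)
    have hmax : (if x > hi then x else hi) = max hi x := by
      rcases max_choice hi x with h1 | h1 <;> rw [h1] <;> split <;> omega
    have hmin : (if x < lo then x else lo) = min lo x := by
      rcases min_choice lo x with h1 | h1 <;> rw [h1] <;> split <;> omega
    simp only [altLoop]
    rw [if_neg (by simp; omega), hmax, hmin, ih _ _ (fun i hi => h i (List.mem_cons_of_mem _ hi))]
    simp [List.foldl]

theorem altLoop_invalid (l : List Int) (hi lo : Int)
    (h : ¬ ∀ i ∈ l, 1 ≤ i ∧ i ≤ 5) :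
    altLoop hi lo l = none := by
  induction l generalizing hi lo with
  | nil => simp at h
  | cons x t ih =>
    simp only [altLoop]
    by_cases hx : 1 ≤ x ∧ x ≤ 5
    · rw [if_neg (by simpa using hx)]
      apply ih
      intro hall
      exact h (fun i hi => by
        rcases List.mem_cons.mp hi with h1 | h1
        · subst h1; exact hx
        · exact hall i h1)
    · simp [hx]

-- ===== VERDICT (by name: the statement is the Claim_ definition above) =====
theorem analysis_ratings_spec : Claim_equal_analysis_ratings := by
  intro ratings _
  unfold Spec_analysis_ratings
  cases ratings with
  | nil => rfl
  | cons x t =>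
    by_cases hv : ∀ i ∈ x :: t, 1 ≤ i ∧ i ≤ 5
    · simp only [analysis_ratings, analysis_ratings_alt]
      rw [if_neg (by simp), if_pos ((arCheck_true_iff _).mpr hv),
        PySem.List.max?_id_cons, PySem.List.min?_id_cons,
        altLoop_valid _ _ _ hv]
      simp [List.foldl]
    · simp only [analysis_ratings, analysis_ratings_alt]
      rw [if_neg (by simp), if_neg (by simpa [arCheck_true_iff] using hv),
        altLoop_invalid _ _ _ hv]
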